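-- pv_equiv track=rewrite | github.com/huiling-y/JSEEGraph | preprocess/preprocess_ace.py | recover_tags_all
-- ===== SOURCE A (Python) =====
-- def recover_sent(tokens, offsets):
--     """
--     recover sentence from a list of tokens and a list of token offsets
--     """
--     sent = ''
--     for i in range(len(tokens)-1):
--         sent += (tokens[i] + ' '*(offsets[i+1][0]-offsets[i][1]))
--     sent += tokens[-1]
--     return sent
--
-- def recover_tags(sent, offset):
--     new_sent = []
--     new_offset = []
--
--     found_tags = []
--
--     left = None
--
--     for i in range(len(sent)):
--
--         if sent[i] == '>' and left != None:
--             found_tags.append((left, i))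
--             left = None
--
--         if sent[i] == '<' or sent[i] == '</':
--             left = i
--
--     found_tags = sorted(found_tags, key=lambda x: x[0])
--
--     l = 0
--
--     for s,t in found_tags:
--
--         for i in range(l, s):
--             new_sent.append(sent[i])
--             new_offset.append(offset[i])
--
--         _tok = recover_sent(sent[s: t+1], offset[s: t+1])
--         _offset = (offset[s][0], offset[t][-1])
--         new_sent.append(_tok)
--         new_offset.append(_offset)
--
--         l = t+1
--
--     if l <= len(sent)-1:
--         for i in range(l, len(sent)):
--             new_sent.append(sent[i])
--             new_offset.append(offset[i])
--
--     return new_sent, new_offset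
--
-- def recover_tags_all(sents, offsets):
--     new_sents = []
--     new_offsets = []
--     for i, (sent, offset) in enumerate(zip(sents, offsets)):
--         new_sent, new_offset = recover_tags(sent, offset)
--         new_sents.append(new_sent)
--         new_offsets.append(new_offset)
--     return new_sents, new_offsets
-- ===== SOURCE B (Python) =====
-- def recover_sent(tokens, offsets):
--     """
--     recover sentence from a list of tokens and a list of token offsets
--     """
--     sent = ''
--     for i in range(len(tokens)-1):
--         sent += (tokens[i] + ' '*(offsets[i+1][0]-offsets[i][1]))
--     sent += tokens[-1]
--     return sent
--
-- def recover_tags(sent, offset):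
--     # single pass: walk the token/offset pairs once, copying verbatim up to each
--     # completed <...> span and emitting the merged span immediately
--     pairs = list(zip(sent, offset))
--     new_sent = []
--     new_offset = []
--     l = 0          # next pair index not yet emitted
--     left = None    # index of the pending '<' / '</', if any
--     for i, (tok, off) in enumerate(pairs):
--         if tok == '>' and left is not None:
--             pre = pairs[l:left]
--             new_sent += [t for t, _ in pre]
--             new_offset += [o for _, o in pre]
--             seg = pairs[left:i + 1]
--             new_sent += [recover_sent([t for t, _ in seg], [o for _, o in seg])]
--             new_offset += [(pairs[left][1][0], off[1])]
--             l = i + 1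
--             left = None
--         if tok == '<' or tok == '</':
--             left = i
--     rest = pairs[l:]
--     new_sent += [t for t, _ in rest]
--     new_offset += [o for _, o in rest]
--     return new_sent, new_offset
--
-- def recover_tags_all(sents, offsets):
--     results = [recover_tags(sent, offset) for sent, offset in zip(sents, offsets)]
--     return [r[0] for r in results], [r[1] for r in results]
-- ===== Notes on version B (the rewrite author's own statement) =====
-- stated objective: alternative
-- what changed: recover_tags is rewritten as a single pass over the zipped token/offset pairs with an emit cursor, emitting each merged tag span as soon as its '>' is seen, instead of first collecting and sorting a found_tags list and then running a second gap-filling pass.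
import Mathlib
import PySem

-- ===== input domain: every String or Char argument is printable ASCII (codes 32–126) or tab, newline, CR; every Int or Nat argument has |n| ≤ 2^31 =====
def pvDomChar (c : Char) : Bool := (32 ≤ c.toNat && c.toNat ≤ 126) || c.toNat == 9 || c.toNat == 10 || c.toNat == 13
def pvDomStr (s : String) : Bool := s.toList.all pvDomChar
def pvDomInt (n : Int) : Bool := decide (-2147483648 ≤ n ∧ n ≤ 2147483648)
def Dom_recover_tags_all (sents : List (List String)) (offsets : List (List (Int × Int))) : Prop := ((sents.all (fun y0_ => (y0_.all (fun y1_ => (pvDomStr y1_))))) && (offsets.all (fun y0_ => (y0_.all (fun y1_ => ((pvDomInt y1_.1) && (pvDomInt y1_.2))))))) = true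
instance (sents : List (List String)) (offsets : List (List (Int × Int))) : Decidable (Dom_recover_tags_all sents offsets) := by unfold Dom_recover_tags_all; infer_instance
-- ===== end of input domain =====

-- B rewrites recover_tags as one pass over the zipped token/offset pairs with an emit
-- cursor (no found_tags list, no sort, no second gap-filling pass): objective 'alternative'.

-- ===== PORT A =====
-- recover_sent is textually identical in A and in B, so both ports share this helper.
-- String concatenation / ' '*k are ported on List Char (exact: Python str concat = char-list
-- append, ' '*k = replicate of max(k,0) spaces).  tokens[-1] is tokens.getD (len-1) ""; the
-- default is never read (A only calls it on nonempty slices).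
def recover_sent (tokens : List String) (offsets : List (Int × Int)) : String :=
  let body := (List.range (tokens.length - 1)).foldl
    (fun (s : List Char) i =>
      s ++ (tokens.getD i "").toList
        ++ List.replicate ((offsets.getD (i + 1) (0, 0)).1 - (offsets.getD i (0, 0)).2).toNat ' ')
    []
  String.ofList (body ++ (tokens.getD (tokens.length - 1) "").toList)

-- loop body of A's tag scan: "if sent[i] == '>' and left != None: …  if sent[i] == '<' or sent[i] == '</': left = i"
def pvScanStep (sent : List String) (st : List (Nat × Nat) × Option Nat) (i : Nat) :
    List (Nat × Nat) × Option Nat :=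
  let tok := sent.getD i ""
  let st :=
    match st.2 with
    | some p => if tok = ">" then (st.1 ++ [(p, i)], (none : Option Nat)) else (st.1, some p)
    | none => st
  if tok = "<" ∨ tok = "</" then (st.1, some i) else st

-- loop body of A's verbatim copy "for i in range(l, s): new_sent.append(sent[i]); new_offset.append(offset[i])"
-- (offset.getD's default is only read where Python raises IndexError, which Pre_ excludes)
def pvCopyStep (sent : List String) (offset : List (Int × Int))
    (q : List String × List (Int × Int)) (i : Nat) : List String × List (Int × Int) :=
  (q.1 ++ [sent.getD i ""], q.2 ++ [offset.getD i (0, 0)])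

-- body of A's "for s, t in found_tags" loop; sent[s:t+1] is ported as drop/take
-- (= PySem.List.slice at these nonnegative in-range Nat bounds, cf. PySem.List.slice_natCast)
def pvTagStep (sent : List String) (offset : List (Int × Int))
    (st : (List String × List (Int × Int)) × Nat) (p : Nat × Nat) :
    (List String × List (Int × Int)) × Nat :=
  let q := (List.range' st.2 (p.1 - st.2)).foldl (pvCopyStep sent offset) st.1
  let tok := recover_sent ((sent.drop p.1).take (p.2 + 1 - p.1)) ((offset.drop p.1).take (p.2 + 1 - p.1))
  let off := ((offset.getD p.1 (0, 0)).1, (offset.getD p.2 (0, 0)).2)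
  ((q.1 ++ [tok], q.2 ++ [off]), p.2 + 1)

-- A's trailing "if l <= len(sent)-1: for i in range(l, len(sent)): …" (condition over Int, as in Python)
def pvFinA (sent : List String) (offset : List (Int × Int))
    (st : (List String × List (Int × Int)) × Nat) : List String × List (Int × Int) :=
  if (st.2 : Int) ≤ (sent.length : Int) - 1 then
    (List.range' st.2 (sent.length - st.2)).foldl (pvCopyStep sent offset) st.1
  else st.1

-- A's recover_tags
def pvRecoverTagsA (sent : List String) (offset : List (Int × Int)) :
    List String × List (Int × Int) :=
  let found := ((List.range sent.length).foldl (pvScanStep sent) ([], none)).1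
  let found_tags := PySem.List.sorted found (fun x => x.1) false
  pvFinA sent offset (found_tags.foldl (pvTagStep sent offset) (([], []), 0))

def recover_tags_all (sents : List (List String)) (offsets : List (List (Int × Int))) : List (List String) × (List (List (Int × Int))) :=
  (List.zip sents offsets).foldl
    (fun st p =>
      let q := pvRecoverTagsA p.1 p.2
      (st.1 ++ [q.1], st.2 ++ [q.2]))
    ([], [])

-- ===== PORT B =====
-- loop body of B's single pass over enumerate(pairs); state = ((new_sent, new_offset), l, left)
def pvAltStep (pairs : List (String × (Int × Int)))
    (st : (List String × List (Int × Int)) × Nat × Option Nat)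
    (e : (String × (Int × Int)) × Nat) :
    (List String × List (Int × Int)) × Nat × Option Nat :=
  let tok := e.1.1
  let st :=
    match st.2.2 with
    | some p =>
      if tok = ">" then
        let pre := (pairs.drop st.2.1).take (p - st.2.1)
        let seg := (pairs.drop p).take (e.2 + 1 - p)
        ((st.1.1 ++ pre.map Prod.fst ++ [recover_sent (seg.map Prod.fst) (seg.map Prod.snd)],
          st.1.2 ++ pre.map Prod.snd ++ [((pairs.getD p ("", (0, 0))).2.1, e.1.2.2)]),
         e.2 + 1, (none : Option Nat))
      else (st.1, st.2.1, some p)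
    | none => st
  if tok = "<" ∨ tok = "</" then (st.1, st.2.1, some e.2) else st

-- B's recover_tags: one pass, then copy the tail pairs[l:]
def pvRecoverTagsB (sent : List String) (offset : List (Int × Int)) :
    List String × List (Int × Int) :=
  let pairs := List.zip sent offset
  let st := (pairs.zipIdx).foldl (pvAltStep pairs) (([], []), 0, none)
  let rest := pairs.drop st.2.1
  (st.1.1 ++ rest.map Prod.fst, st.1.2 ++ rest.map Prod.snd)

def recover_tags_all_alt (sents : List (List String)) (offsets : List (List (Int × Int))) : List (List String) × (List (List (Int × Int))) :=
  let results := (List.zip sents offsets).map (fun p => pvRecoverTagsB p.1 p.2)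
  (results.map Prod.fst, results.map Prod.snd)

-- ===== PRECONDITION & SPEC =====
-- A raises IndexError as soon as a zipped sentence has fewer offsets than tokens; Pre_ excludes exactly that.
def Pre_recover_tags_all (sents : List (List String)) (offsets : List (List (Int × Int))) : Prop :=
  ∀ p ∈ List.zip sents offsets, p.1.length ≤ p.2.length
instance (sents : List (List String)) (offsets : List (List (Int × Int))) : Decidable (Pre_recover_tags_all sents offsets) := by unfold Pre_recover_tags_all; infer_instance

def pvWitness_recover_tags_all : List (List String) × (List (List (Int × Int))) :=
  ([["<", "x", ">", "y"]], [[(0, 1), (2, 3), (4, 5), (6, 7)]])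

def Spec_recover_tags_all (sents : List (List String)) (offsets : List (List (Int × Int))) (out : List (List String) × (List (List (Int × Int)))) : Prop := out = recover_tags_all_alt sents offsets
instance (sents : List (List String)) (offsets : List (List (Int × Int))) (out : List (List String) × (List (List (Int × Int)))) : Decidable (Spec_recover_tags_all sents offsets out) := by unfold Spec_recover_tags_all; infer_instance

-- ===== CLAIM (what is proved, stated in full; the proofs are below) =====
def Claim_equal_recover_tags_all : Prop := ∀ (sents : List (List String)) (offsets : List (List (Int × Int))), Dom_recover_tags_all sents offsets → Pre_recover_tags_all sents offsets → Spec_recover_tags_all sents offsets (recover_tags_all sents offsets)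


-- ===== LEMMAS AND PROOFS =====

-- the tag spans A's first loop collects, read off structurally from index i with k steps to go
def pvTags (sent : List String) : Nat → Nat → Option Nat → List (Nat × Nat)
  | 0, _, _ => []
  | k + 1, i, left =>
    let tok := sent.getD i ""
    let emit : List (Nat × Nat) :=
      match left with
      | some p => if tok = ">" then [(p, i)] else []
      | none => []
    let left' : Option Nat :=
      match left with
      | some p => if tok = ">" then none else some p
      | none => none
    let left'' : Option Nat := if tok = "<" ∨ tok = "</" then some i else left'
    emit ++ pvTags sent k (i + 1) left''

lemma pvScan_eq (sent : List String) :
    ∀ (k i : Nat) (acc : List (Nat × Nat)) (left : Option Nat),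
      ((List.range' i k).foldl (pvScanStep sent) (acc, left)).1 = acc ++ pvTags sent k i left := by
  intro k
  induction k with
  | zero => intro i acc left; simp [pvTags]
  | succ k ih =>
    intro i acc left
    rw [List.range'_succ, List.foldl_cons]
    cases left with
    | none =>
      by_cases hc : sent.getD i "" = "<" ∨ sent.getD i "" = "</"
      · simp only [pvScanStep, if_pos hc, ih, pvTags]
        simp
      · simp only [pvScanStep, if_neg hc, ih, pvTags]
        simp [if_neg hc]
    | some p =>
      by_cases hgt : sent.getD i "" = ">"
      · have hc : ¬ (sent.getD i "" = "<" ∨ sent.getD i "" = "</") := by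
          rw [hgt]; decide
        simp only [pvScanStep, hgt, if_pos rfl, if_neg hc, ih, pvTags]
        simp [hgt, if_neg hc, hc]
      · by_cases hc : sent.getD i "" = "<" ∨ sent.getD i "" = "</"
        · simp only [pvScanStep, if_neg hgt, if_pos hc, ih, pvTags]
          simp [if_pos hc, if_neg hgt]
        · simp only [pvScanStep, if_neg hgt, if_neg hc, ih, pvTags]
          simp [if_neg hc, if_neg hgt]

lemma pvTags_lb (sent : List String) :
    ∀ (k i : Nat) (left : Option Nat) (q : Nat × Nat), q ∈ pvTags sent k i left →
      (match left with | none => i | some p => min p i) ≤ q.1 := by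
  intro k
  induction k with
  | zero => intro i left q hq; simp [pvTags] at hq
  | succ k ih =>
    intro i left q hq
    cases left with
    | none =>
      show i ≤ q.1
      by_cases hc : sent[i]?.getD "" = "<" ∨ sent[i]?.getD "" = "</"
      · rcases hc with h | h <;>
        · simp [pvTags, h] at hq
          have h2 : min i (i + 1) ≤ q.1 := ih (i + 1) (some i) q hq
          omega
      · push_neg at hc
        simp [pvTags, hc.1, hc.2] at hq
        have h2 : i + 1 ≤ q.1 := ih (i + 1) none q hq
        omega
    | some p =>
      show min p i ≤ q.1
      by_cases hgt : sent[i]?.getD "" = ">"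
      · simp [pvTags, hgt] at hq
        rcases hq with hq | hq
        · simp [hq]
        · have h2 : i + 1 ≤ q.1 := ih (i + 1) none q hq
          omega
      · by_cases hc : sent[i]?.getD "" = "<" ∨ sent[i]?.getD "" = "</"
        · rcases hc with h | h <;>
          · simp [pvTags, h] at hq
            have h2 : min i (i + 1) ≤ q.1 := ih (i + 1) (some i) q hq
            omega
        · push_neg at hc
          simp [pvTags, hgt, hc.1, hc.2] at hq
          have h2 : min p (i + 1) ≤ q.1 := ih (i + 1) (some p) q hq
          omega

lemma pvTags_pairwise (sent : List String) :
    ∀ (k i : Nat) (left : Option Nat), (∀ p, left = some p → p ≤ i) →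
      (pvTags sent k i left).Pairwise (fun a b => a.1 < b.1) := by
  intro k
  induction k with
  | zero => intro i left _; simp [pvTags]
  | succ k ih =>
    intro i left hle
    cases left with
    | none =>
      by_cases hc : sent[i]?.getD "" = "<" ∨ sent[i]?.getD "" = "</"
      · rcases hc with h | h <;>
        · simp only [pvTags]
          simp [h]
          exact ih (i + 1) (some i) (by intro r hr; cases hr; omega)
      · push_neg at hc
        simp only [pvTags]
        simp [hc.1, hc.2]
        exact ih (i + 1) none (by simp)
    | some p =>
      have hp : p ≤ i := hle p rfl
      by_cases hgt : sent[i]?.getD "" = ">"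
      · simp only [pvTags]
        simp [hgt]
        refine ⟨?_, ih (i + 1) none (by simp)⟩
        intro a b hq
        have h1 := pvTags_lb sent k (i + 1) none (a, b) hq
        simp at h1
        omega
      · by_cases hc : sent[i]?.getD "" = "<" ∨ sent[i]?.getD "" = "</"
        · rcases hc with h | h <;>
          · simp only [pvTags]
            simp [h]
            exact ih (i + 1) (some i) (by intro r hr; cases hr; omega)
        · push_neg at hc
          simp only [pvTags]
          simp [hgt, hc.1, hc.2]
          exact ih (i + 1) (some p) (by intro r hr; cases hr; omega)

lemma map_getD_range' {α : Type} (xs : List α) (d : α) :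
    ∀ (k l : Nat), l + k ≤ xs.length →
      (List.range' l k).map (fun i => xs.getD i d) = (xs.drop l).take k := by
  intro k
  induction k with
  | zero => intro l _; simp
  | succ k ih =>
    intro l h
    have hl : l < xs.length := by omega
    rw [List.range'_succ, List.map_cons, List.drop_eq_getElem_cons hl, List.take_succ_cons,
      List.getD_eq_getElem xs d hl, ih (l + 1) (by omega)]

lemma zip_slice_fst {α β : Type} (xs : List α) (ys : List β) (h : xs.length ≤ ys.length)
    (l k : Nat) (hk : l + k ≤ xs.length) :
    ((((List.zip xs ys).drop l).take k).map Prod.fst) = (xs.drop l).take k := by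
  apply List.ext_getElem
  · simp [List.length_zip]; omega
  · intro j h1 h2
    simp only [List.getElem_map, List.getElem_take, List.getElem_drop, List.getElem_zip]

lemma zip_slice_snd {α β : Type} (xs : List α) (ys : List β) (h : xs.length ≤ ys.length)
    (l k : Nat) (hk : l + k ≤ xs.length) :
    ((((List.zip xs ys).drop l).take k).map Prod.snd) = (ys.drop l).take k := by
  apply List.ext_getElem
  · simp [List.length_zip]; omega
  · intro j h1 h2
    simp only [List.getElem_map, List.getElem_take, List.getElem_drop, List.getElem_zip]

lemma copy_eq (sent : List String) (offset : List (Int × Int)) (h : sent.length ≤ offset.length)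
    (l k : Nat) (hk : l + k ≤ sent.length) (ns : List String) (no : List (Int × Int)) :
    (List.range' l k).foldl (pvCopyStep sent offset) (ns, no)
      = (ns ++ (((List.zip sent offset).drop l).take k).map Prod.fst,
         no ++ (((List.zip sent offset).drop l).take k).map Prod.snd) := by
  show (List.range' l k).foldl
      (fun (q : List String × List (Int × Int)) i => (q.1 ++ [sent.getD i ""], q.2 ++ [offset.getD i (0, 0)])) (ns, no) = _
  rw [PySem.List.foldl_prod_mk (f := fun (a : List String) i => a ++ [sent.getD i ""])
      (g := fun (a : List (Int × Int)) i => a ++ [offset.getD i (0, 0)]),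
    PySem.List.foldl_append_singleton_eq_map, PySem.List.foldl_append_singleton_eq_map,
    map_getD_range' sent _ k l hk, map_getD_range' offset _ k l (by omega),
    zip_slice_fst sent offset h l k hk, zip_slice_snd sent offset h l k hk]

lemma pvMain (sent : List String) (offset : List (Int × Int)) (hlen : sent.length ≤ offset.length) :
    ∀ (k i l : Nat) (left : Option Nat) (ns : List String) (no : List (Int × Int)),
      i + k = sent.length → l ≤ i → (∀ p, left = some p → l ≤ p ∧ p < i) →
      pvFinA sent offset ((pvTags sent k i left).foldl (pvTagStep sent offset) ((ns, no), l))
        = (let pairs := List.zip sent offset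
           let st := (((pairs.drop i).zipIdx i).foldl (pvAltStep pairs) ((ns, no), l, left))
           (st.1.1 ++ (pairs.drop st.2.1).map Prod.fst, st.1.2 ++ (pairs.drop st.2.1).map Prod.snd)) := by
  have hplen : (List.zip sent offset).length = sent.length := by
    rw [List.length_zip]; omega
  intro k
  induction k with
  | zero =>
    intro i l left ns no hik hl hleft
    have hi : i = sent.length := by omega
    have hdropi : (List.zip sent offset).drop i = [] := by
      apply List.drop_eq_nil_of_le; omega
    simp only [pvTags, List.foldl_nil, hdropi, List.zipIdx_nil, pvFinA]
    by_cases hlt : l < sent.length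
    · rw [if_pos (by omega : (l : Int) ≤ (sent.length : Int) - 1)]
      rw [copy_eq sent offset hlen l (sent.length - l) (by omega) ns no]
      have htk : ((List.zip sent offset).drop l).take (sent.length - l) = (List.zip sent offset).drop l := by
        apply List.take_of_length_le
        rw [List.length_drop, hplen]
      rw [htk]
    · rw [if_neg (by omega : ¬ (l : Int) ≤ (sent.length : Int) - 1)]
      have hdl : (List.zip sent offset).drop l = [] := by
        apply List.drop_eq_nil_of_le; omega
      simp [hdl]
  | succ k ih =>
    intro i l left ns no hik hl hleft
    have hin : i < sent.length := by omega
    have hio : i < offset.length := by omega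
    have hip : i < (List.zip sent offset).length := by omega
    have hopt : sent[i]? = some sent[i] := List.getElem?_eq_getElem hin
    have hpi : (List.zip sent offset)[i] = (sent[i], offset[i]) := List.getElem_zip
    simp only [List.drop_eq_getElem_cons hip, List.zipIdx_cons, List.foldl_cons, hpi]
    cases left with
    | none =>
      by_cases hc : sent[i] = "<" ∨ sent[i] = "</"
      · have e1 : pvTags sent (k + 1) i none = pvTags sent k (i + 1) (some i) := by
          rcases hc with h | h <;> simp [pvTags, hopt, h]
        have e2 : pvAltStep (List.zip sent offset) ((ns, no), l, none) ((sent[i], offset[i]), i)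
            = ((ns, no), l, some i) := by
          rcases hc with h | h <;> simp [pvAltStep, h]
        rw [e1, e2]
        exact ih (i + 1) l (some i) ns no (by omega) (by omega)
          (by intro r hr; cases hr; omega)
      · push_neg at hc
        have e1 : pvTags sent (k + 1) i none = pvTags sent k (i + 1) none := by
          simp [pvTags, hopt, hc.1, hc.2]
        have e2 : pvAltStep (List.zip sent offset) ((ns, no), l, none) ((sent[i], offset[i]), i)
            = ((ns, no), l, none) := by
          simp [pvAltStep, hc.1, hc.2]
        rw [e1, e2]
        exact ih (i + 1) l none ns no (by omega) (by omega) (by simp)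
    | some p =>
      obtain ⟨hlp, hpi'⟩ := hleft p rfl
      by_cases hgt : sent[i] = ">"
      · have hc : ¬ (sent[i] = "<" ∨ sent[i] = "</") := by rw [hgt]; decide
        have e1 : pvTags sent (k + 1) i (some p) = (p, i) :: pvTags sent k (i + 1) none := by
          simp [pvTags, hopt, hgt]
        set pre := ((List.zip sent offset).drop l).take (p - l) with hpre
        set ns' := ns ++ pre.map Prod.fst
            ++ [recover_sent ((sent.drop p).take (i + 1 - p)) ((offset.drop p).take (i + 1 - p))] with hns'
        set no' := no ++ pre.map Prod.snd ++ [((offset.getD p (0, 0)).1, (offset.getD i (0, 0)).2)] with hno'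
        have e2 : pvAltStep (List.zip sent offset) ((ns, no), l, some p) ((sent[i], offset[i]), i)
            = ((ns', no'), i + 1, none) := by
          have hgp : (List.zip sent offset).getD p ("", (0, 0)) = (sent[p], offset[p]) := by
            rw [List.getD_eq_getElem _ _ (by omega : p < (List.zip sent offset).length), List.getElem_zip]
          simp [pvAltStep, hgt, hns', hno', hpre,
            zip_slice_fst sent offset hlen p (i + 1 - p) (by omega),
            zip_slice_snd sent offset hlen p (i + 1 - p) (by omega),
            List.getD_eq_getElem offset (0, 0) (by omega : p < offset.length),
            List.getD_eq_getElem offset (0, 0) hio,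
            List.getElem?_eq_getElem (by omega : p < (List.zip sent offset).length),
            List.getElem?_eq_getElem (by omega : p < offset.length),
            List.getElem?_eq_getElem hio, List.getElem_zip]
        have e3 : pvTagStep sent offset ((ns, no), l) (p, i) = ((ns', no'), i + 1) := by
          simp only [pvTagStep]
          rw [copy_eq sent offset hlen l (p - l) (by omega) ns no]
        rw [e1, List.foldl_cons, e3, e2]
        exact ih (i + 1) (i + 1) none ns' no' (by omega) (by omega) (by simp)
      · by_cases hc : sent[i] = "<" ∨ sent[i] = "</"
        · have e1 : pvTags sent (k + 1) i (some p) = pvTags sent k (i + 1) (some i) := by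
            rcases hc with h | h <;> simp [pvTags, hopt, h, hgt]
          have e2 : pvAltStep (List.zip sent offset) ((ns, no), l, some p) ((sent[i], offset[i]), i)
              = ((ns, no), l, some i) := by
            rcases hc with h | h <;> simp [pvAltStep, h, hgt]
          rw [e1, e2]
          exact ih (i + 1) l (some i) ns no (by omega) (by omega)
            (by intro r hr; cases hr; omega)
        · push_neg at hc
          have e1 : pvTags sent (k + 1) i (some p) = pvTags sent k (i + 1) (some p) := by
            simp [pvTags, hopt, hgt, hc.1, hc.2]
          have e2 : pvAltStep (List.zip sent offset) ((ns, no), l, some p) ((sent[i], offset[i]), i)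
              = ((ns, no), l, some p) := by
            simp [pvAltStep, hgt, hc.1, hc.2]
          rw [e1, e2]
          exact ih (i + 1) l (some p) ns no (by omega) (by omega)
            (by intro r hr; cases hr; omega)

lemma pair_eq (sent : List String) (offset : List (Int × Int)) (h : sent.length ≤ offset.length) :
    pvRecoverTagsA sent offset = pvRecoverTagsB sent offset := by
  simp only [pvRecoverTagsA, pvRecoverTagsB]
  rw [List.range_eq_range', pvScan_eq sent sent.length 0 [] none, List.nil_append,
    PySem.List.sorted_eq_self_of_pairwise _ _
      ((pvTags_pairwise sent sent.length 0 none (by simp)).imp (fun h => Nat.le_of_lt h))]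
  have hm := pvMain sent offset h sent.length 0 0 none [] [] (by omega) (by omega) (by simp)
  simpa using hm

-- ===== VERDICT (by name: the statement is the Claim_ definition above) =====
theorem recover_tags_all_spec : Claim_equal_recover_tags_all := by
  intro sents offsets _ hpre
  unfold Spec_recover_tags_all recover_tags_all recover_tags_all_alt
  show (List.zip sents offsets).foldl
      (fun (st : List (List String) × List (List (Int × Int))) p =>
        (st.1 ++ [(pvRecoverTagsA p.1 p.2).1], st.2 ++ [(pvRecoverTagsA p.1 p.2).2])) ([], []) = _
  rw [PySem.List.foldl_prod_mk
      (f := fun (acc : List (List String)) (p : List String × List (Int × Int)) => acc ++ [(pvRecoverTagsA p.1 p.2).1])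
      (g := fun (acc : List (List (Int × Int))) (p : List String × List (Int × Int)) => acc ++ [(pvRecoverTagsA p.1 p.2).2]),
    PySem.List.foldl_append_singleton_eq_map, PySem.List.foldl_append_singleton_eq_map]
  simp only [List.map_map, List.nil_append]
  refine congrArg₂ Prod.mk ?_ ?_ <;>
  · apply List.map_congr_left
    intro p hp
    simp [pair_eq p.1 p.2 (hpre p hp)]
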